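-- pv_equiv track=rewrite | github.com/Candysad/leetcode | python/2105.给植物浇水-ii.py | minimumRefill
-- ===== SOURCE A (Python) =====
-- from typing import List
--
-- def minimumRefill(plants: List[int], capacityA: int, capacityB: int) -> int:
--     n = len(plants)
--     if n == 1:
--         return 0
--     a, b = 0, n - 1
--     ca, cb = capacityA, capacityB
--     result = 0
--     while a < b:
--         if ca >= plants[a]:
--             ca -= plants[a]
--         else:
--             ca = capacityA - plants[a]
--             result += 1
--
--         if cb >= plants[b]:
--             cb -= plants[b]
--         else:
--             cb = capacityB - plants[b]
--             result += 1
--         a += 1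
--         b -= 1
--
--     if a == b:
--         if ca >= cb:
--             if ca < plants[a]:
--                 result += 1
--         else:
--             if cb < plants[b]:
--                 result += 1
--     return result
-- ===== SOURCE B (Python) =====
-- from typing import List
--
-- def minimumRefill(plants: List[int], capacityA: int, capacityB: int) -> int:
--     n = len(plants)
--     if n == 1:
--         return 0
--     half = n // 2
--     # Cumulative water arrays: P over plants, Q over the reversed list.
--     P = [0]
--     for p in plants:
--         P.append(P[-1] + p)
--     Q = [0]
--     for p in reversed(plants):
--         Q.append(Q[-1] + p)
--     # A refill happens exactly when the water poured since the last refill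
--     # (a difference of cumulative sums) would exceed the can's capacity;
--     # we only record the checkpoint cumulative value at each refill.
--     refills = 0
--     lastA = 0
--     for i in range(half):
--         if P[i + 1] - lastA > capacityA:
--             refills += 1
--             lastA = P[i]
--     lastB = 0
--     for k in range(half):
--         if Q[k + 1] - lastB > capacityB:
--             refills += 1
--             lastB = Q[k]
--     if n % 2 == 1:
--         remA = capacityA - (P[half] - lastA)
--         remB = capacityB - (Q[half] - lastB)
--         if remA >= remB:
--             if remA < plants[half]:
--                 refills += 1
--         else:
--             if remB < plants[half]:
--                 refills += 1
--     return refills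
-- ===== Notes on version B (the rewrite author's own statement) =====
-- stated objective: alternative
-- what changed: Replaces A's direct two-pointer simulation that decrements the remaining water in each can with a precomputed cumulative-sum pass: B builds prefix sums of the list and of its reversal, detects each refill by comparing a difference of cumulative sums against the capacity while only recording the checkpoint sum at the last refill, and reconstructs the remaining water for the middle plant by arithmetic on those sums.
import Mathlib
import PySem

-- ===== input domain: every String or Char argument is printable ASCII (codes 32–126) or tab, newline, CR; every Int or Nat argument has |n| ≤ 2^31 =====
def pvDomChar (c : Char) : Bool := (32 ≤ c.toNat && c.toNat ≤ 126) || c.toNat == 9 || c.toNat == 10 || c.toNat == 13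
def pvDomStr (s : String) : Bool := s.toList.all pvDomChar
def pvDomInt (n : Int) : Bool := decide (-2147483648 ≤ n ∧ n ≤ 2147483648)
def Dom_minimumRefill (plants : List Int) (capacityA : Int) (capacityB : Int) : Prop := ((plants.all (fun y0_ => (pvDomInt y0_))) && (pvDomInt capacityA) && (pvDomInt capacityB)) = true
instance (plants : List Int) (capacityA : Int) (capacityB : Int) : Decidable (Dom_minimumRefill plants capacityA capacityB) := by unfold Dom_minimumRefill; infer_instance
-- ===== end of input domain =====

-- B replaces A's direct two-pointer water simulation with a cumulative-sum (prefix-sum)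
-- reformulation: refills are found by comparing differences of precomputed cumulative sums
-- against the capacity (objective: alternative algorithm, same O(n) cost).

-- shared indexing helper: plants[i]; every index used is in range, so the default is never taken
def pvAt (xs : List Int) (i : Int) : Int := (PySem.List.pyGet? xs i).getD 0

-- ===== PORT A =====
def minimumRefillLoop (plants : List Int) (capacityA capacityB : Int)
    (a b ca cb result : Int) : Int :=
  if h : a < b then
    let pa := pvAt plants a
    let s1 : Int × Int := if ca ≥ pa then (ca - pa, result) else (capacityA - pa, result + 1)
    let pb := pvAt plants b
    let s2 : Int × Int := if cb ≥ pb then (cb - pb, s1.2) else (capacityB - pb, s1.2 + 1)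
    minimumRefillLoop plants capacityA capacityB (a + 1) (b - 1) s1.1 s2.1 s2.2
  else
    if a = b then
      if ca ≥ cb then (if ca < pvAt plants a then result + 1 else result)
      else (if cb < pvAt plants b then result + 1 else result)
    else result
termination_by (b - a).toNat
decreasing_by omega

def minimumRefill (plants : List Int) (capacityA : Int) (capacityB : Int) : Int :=
  let n : Int := plants.length
  if n = 1 then 0
  else minimumRefillLoop plants capacityA capacityB 0 (n - 1) capacityA capacityB 0

-- ===== PORT B =====
-- P = [0]; for p in xs: P.append(P[-1] + p)
def buildPrefix (xs : List Int) : List Int :=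
  xs.foldl (fun P p => P ++ [(PySem.List.pyGet? P (-1)).getD 0 + p]) [0]

-- one step of B's scan; state = (refills, last checkpoint cumulative sum)
def prefStep (cap : Int) (P : List Int) (s : Int × Int) (i : Int) : Int × Int :=
  if pvAt P (i + 1) - s.2 > cap then (s.1 + 1, pvAt P i) else s

def minimumRefill_alt (plants : List Int) (capacityA : Int) (capacityB : Int) : Int :=
  let n : Int := plants.length
  if n = 1 then 0
  else
    let half := PySem.Int.floordiv n 2
    let P := buildPrefix plants
    let Q := buildPrefix plants.reverse
    let sA := (PySem.List.pyRange 0 half 1).foldl (prefStep capacityA P) (0, 0)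
    let sB := (PySem.List.pyRange 0 half 1).foldl (prefStep capacityB Q) (sA.1, 0)
    if PySem.Int.mod n 2 = 1 then
      let remA := capacityA - (pvAt P half - sA.2)
      let remB := capacityB - (pvAt Q half - sB.2)
      if remA ≥ remB then (if remA < pvAt plants half then sB.1 + 1 else sB.1)
      else (if remB < pvAt plants half then sB.1 + 1 else sB.1)
    else sB.1

-- ===== PRECONDITION & SPEC =====
def Spec_minimumRefill (plants : List Int) (capacityA : Int) (capacityB : Int) (out : Int) : Prop := out = minimumRefill_alt plants capacityA capacityB
instance (plants : List Int) (capacityA : Int) (capacityB : Int) (out : Int) : Decidable (Spec_minimumRefill plants capacityA capacityB out) := by unfold Spec_minimumRefill; infer_instance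

-- ===== CLAIM (what is proved, stated in full; the proofs are below) =====
def Claim_equal_minimumRefill : Prop := ∀ (plants : List Int) (capacityA : Int) (capacityB : Int), Dom_minimumRefill plants capacityA capacityB → Spec_minimumRefill plants capacityA capacityB (minimumRefill plants capacityA capacityB)

-- ===== LEMMAS AND PROOFS =====

-- proof-only: A's per-waterer step in direct 'remaining water' form (state = (remaining, refills))
def altStep (cap : Int) (plants : List Int) (s : Int × Int) (i : Int) : Int × Int :=
  let p := pvAt plants i
  if s.1 ≥ p then (s.1 - p, s.2) else (cap - p, s.2 + 1)

-- proof-only: the middle-plant tail as a function of the two direct fold states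
def altFin (plants : List Int) (n half : Int) (sA sB : Int × Int) : Int :=
  if PySem.Int.mod n 2 = 1 then
    if sA.1 ≥ sB.1 then (if sA.1 < pvAt plants half then sA.2 + sB.2 + 1 else sA.2 + sB.2)
    else (if sB.1 < pvAt plants half then sA.2 + sB.2 + 1 else sA.2 + sB.2)
  else sA.2 + sB.2

lemma loop_eq (plants : List Int) (cA cB : Int) :
    ∀ (k : Nat) (a ca cb ra rb : Int),
    (PySem.Int.floordiv (plants.length : Int) 2 - a).toNat = k →
    0 ≤ a → a ≤ PySem.Int.floordiv (plants.length : Int) 2 →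
    minimumRefillLoop plants cA cB a ((plants.length : Int) - 1 - a) ca cb (ra + rb) =
      altFin plants (plants.length : Int) (PySem.Int.floordiv (plants.length : Int) 2)
        ((PySem.List.pyRange a (PySem.Int.floordiv (plants.length : Int) 2) 1).foldl
          (altStep cA plants) (ca, ra))
        ((PySem.List.pyRange ((plants.length : Int) - 1 - a)
            ((plants.length : Int) - 1 - PySem.Int.floordiv (plants.length : Int) 2) (-1)).foldl
          (altStep cB plants) (cb, rb)) := by
  intro k
  induction k with
  | zero =>
      intro a ca cb ra rb hk h0 h1
      set n : Int := (plants.length : Int) with hn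
      have hn0 : 0 ≤ n := by positivity
      have hhalf : PySem.Int.floordiv n 2 = n / 2 :=
        PySem.Int.floordiv_eq_ediv_of_pos (by norm_num)
      have hmod : PySem.Int.mod n 2 = n % 2 :=
        PySem.Int.mod_eq_emod_of_pos (by norm_num)
      have ha : a = PySem.Int.floordiv n 2 := by rw [hhalf] at h1 hk ⊢; omega
      rw [minimumRefillLoop]
      have hnotlt : ¬ (a < n - 1 - a) := by rw [ha, hhalf] at *; omega
      rw [dif_neg hnotlt, ← ha,
          PySem.List.pyRange_one_eq_nil (le_refl a),
          PySem.List.pyRange_neg_one_eq_nil (le_refl (n - 1 - a))]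
      simp only [List.foldl_nil]
      unfold altFin
      rw [hmod]
      by_cases hodd : n % 2 = 1
      · have heq : a = n - 1 - a := by rw [ha, hhalf] at *; omega
        rw [if_pos heq, if_pos hodd, ← heq]
      · have hne : a ≠ n - 1 - a := by rw [ha, hhalf] at *; omega
        rw [if_neg hne, if_neg hodd]
  | succ k ih =>
      intro a ca cb ra rb hk h0 h1
      set n : Int := (plants.length : Int) with hn
      have hhalf : PySem.Int.floordiv n 2 = n / 2 :=
        PySem.Int.floordiv_eq_ediv_of_pos (by norm_num)
      have halt : a < PySem.Int.floordiv n 2 := by rw [hhalf] at hk ⊢; omega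
      have hab : a < n - 1 - a := by rw [hhalf] at halt; omega
      rw [minimumRefillLoop, dif_pos hab,
          PySem.List.pyRange_one_cons halt,
          PySem.List.pyRange_neg_one_cons (show n - 1 - PySem.Int.floordiv n 2 < n - 1 - a by omega)]
      simp only [List.foldl_cons]
      have hnext : n - 1 - a - 1 = n - 1 - (a + 1) := by ring
      have hk' : (PySem.Int.floordiv n 2 - (a + 1)).toNat = k := by rw [hhalf] at hk ⊢; omega
      have h0' : 0 ≤ a + 1 := by omega
      have h1' : a + 1 ≤ PySem.Int.floordiv n 2 := by omega
      by_cases hA : ca ≥ pvAt plants a <;> by_cases hB : cb ≥ pvAt plants (n - 1 - a) <;>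
        simp only [hA, hB, altStep, if_true, if_false] <;> rw [hnext]
      · exact ih (a + 1) _ _ ra rb hk' h0' h1'
      · rw [show ra + rb + 1 = ra + (rb + 1) by ring]
        exact ih (a + 1) _ _ ra (rb + 1) hk' h0' h1'
      · rw [show ra + rb + 1 = (ra + 1) + rb by ring]
        exact ih (a + 1) _ _ (ra + 1) rb hk' h0' h1'
      · rw [show ra + rb + 1 + 1 = (ra + 1) + (rb + 1) by ring]
        exact ih (a + 1) _ _ (ra + 1) (rb + 1) hk' h0' h1'

-- proof-only: buildPrefix in structural-recursion form
def psums : Int → List Int → List Int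
  | c, [] => [c]
  | c, x :: xs => c :: psums (c + x) xs

lemma build_go (xs : List Int) : ∀ (acc : List Int) (c : Int),
    xs.foldl (fun P p => P ++ [(PySem.List.pyGet? P (-1)).getD 0 + p]) (acc ++ [c]) =
      acc ++ psums c xs := by
  induction xs with
  | nil => intro acc c; simp [psums]
  | cons x xs ih =>
      intro acc c
      simp only [List.foldl_cons, PySem.List.pyGet?_neg_one_append_singleton, Option.getD_some]
      rw [show (acc ++ [c]) ++ [c + x] = (acc ++ [c]) ++ [c + x] from rfl, ih (acc ++ [c]) (c + x)]
      simp [psums]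

lemma build_eq_psums (xs : List Int) : buildPrefix xs = psums 0 xs := by
  have := build_go xs [] 0
  simpa [buildPrefix] using this

lemma psums_getD (xs : List Int) : ∀ (c : Int) (i : Nat), i ≤ xs.length →
    ((psums c xs)[i]?).getD 0 = c + (xs.take i).sum := by
  induction xs with
  | nil =>
      intro c i h
      obtain rfl : i = 0 := by simpa using h
      simp [psums]
  | cons x xs ih =>
      intro c i h
      cases i with
      | zero => simp [psums]
      | succ i =>
          simp only [psums, List.getElem?_cons_succ, List.take_succ_cons, List.sum_cons]
          rw [ih (c + x) i (by simpa using h)]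
          ring

lemma pvAt_nonneg (xs : List Int) (i : Int) (h : 0 ≤ i) :
    pvAt xs i = (xs[i.toNat]?).getD 0 := by
  unfold pvAt
  rw [show i = ((i.toNat : Nat) : Int) by omega, PySem.List.pyGet?_natCast, Int.toNat_natCast]

lemma pref_at (xs : List Int) (i : Int) (h0 : 0 ≤ i) (h1 : i ≤ xs.length) :
    pvAt (buildPrefix xs) i = (xs.take i.toNat).sum := by
  rw [pvAt_nonneg _ _ h0, build_eq_psums, psums_getD xs 0 i.toNat (by omega)]
  ring

lemma pref_zero (xs : List Int) : pvAt (buildPrefix xs) 0 = 0 := by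
  simpa using pref_at xs 0 (le_refl 0) (by positivity)

lemma pref_succ (xs : List Int) (i : Int) (h0 : 0 ≤ i) (h1 : i < xs.length) :
    pvAt (buildPrefix xs) (i + 1) = pvAt (buildPrefix xs) i + pvAt xs i := by
  rw [pref_at xs i h0 (by omega), pref_at xs (i + 1) (by omega) (by omega),
      pvAt_nonneg xs i h0]
  have hj : i.toNat < xs.length := by omega
  rw [show (i + 1).toNat = i.toNat + 1 by omega,
      List.take_add_one, List.sum_append, List.getElem?_eq_getElem hj]
  simp

-- counter offset: the refill counter does not influence the scan
lemma prefStep_offset (cap : Int) (P : List Int) : ∀ (l : List Int) (s : Int × Int),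
    l.foldl (prefStep cap P) s =
      (s.1 + (l.foldl (prefStep cap P) (0, s.2)).1, (l.foldl (prefStep cap P) (0, s.2)).2) := by
  intro l
  induction l with
  | nil => intro s; simp
  | cons i l ih =>
      intro s
      simp only [List.foldl_cons, prefStep]
      by_cases hc : pvAt P (i + 1) - s.2 > cap
      · simp only [hc, if_pos]
        rw [ih (s.1 + 1, pvAt P i), ih (0 + 1, pvAt P i)]
        simp only [Prod.mk.injEq]
        constructor <;> (simp; try ring)
      · simp only [hc, if_false]
        exact ih s

-- bisimulation: the direct 'remaining water' fold vs B's checkpoint scan over the same range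
lemma side_eq (cap : Int) (xs : List Int) : ∀ (k : Nat) (a r last : Int),
    0 ≤ a → a + k ≤ xs.length →
    (PySem.List.pyRange a (a + k) 1).foldl (altStep cap xs)
        (cap - (pvAt (buildPrefix xs) a - last), r) =
      (cap - (pvAt (buildPrefix xs) (a + k) -
          ((PySem.List.pyRange a (a + k) 1).foldl (prefStep cap (buildPrefix xs)) (r, last)).2),
       ((PySem.List.pyRange a (a + k) 1).foldl (prefStep cap (buildPrefix xs)) (r, last)).1) := by
  intro k
  induction k with
  | zero =>
      intro a r last h0 h1
      rw [show a + ((0 : Nat) : Int) = a by push_cast; ring,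
          PySem.List.pyRange_one_eq_nil (le_refl a)]
      simp
  | succ k ih =>
      intro a r last h0 h1
      have hlt : a < a + ((k + 1 : Nat) : Int) := by push_cast; omega
      rw [PySem.List.pyRange_one_cons hlt]
      simp only [List.foldl_cons]
      have hilen : a < (xs.length : Int) := by push_cast at h1 ⊢; omega
      have hps := pref_succ xs a h0 hilen
      have hcast : a + ((k + 1 : Nat) : Int) = (a + 1) + ((k : Nat) : Int) := by push_cast; ring
      by_cases hc : pvAt (buildPrefix xs) (a + 1) - last > cap
      · -- refill step
        have hA : ¬ (cap - (pvAt (buildPrefix xs) a - last) ≥ pvAt xs a) := by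
          rw [hps] at hc; omega
        simp only [altStep, prefStep, hA, if_false, hc, if_pos]
        have : cap - pvAt xs a =
            cap - (pvAt (buildPrefix xs) (a + 1) - pvAt (buildPrefix xs) a) := by
          rw [hps]; ring
        rw [this, hcast]
        exact ih (a + 1) (r + 1) (pvAt (buildPrefix xs) a) (by omega) (by push_cast at h1 ⊢; omega)
      · -- no refill
        have hA : cap - (pvAt (buildPrefix xs) a - last) ≥ pvAt xs a := by
          rw [hps] at hc; omega
        simp only [altStep, prefStep, hA, if_pos, hc, if_false]
        have : cap - (pvAt (buildPrefix xs) a - last) - pvAt xs a =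
            cap - (pvAt (buildPrefix xs) (a + 1) - last) := by rw [hps]; ring
        rw [this, hcast]
        exact ih (a + 1) r last (by omega) (by push_cast at h1 ⊢; omega)

lemma rev_at (xs : List Int) (k : Int) (h0 : 0 ≤ k) (h1 : k < xs.length) :
    pvAt xs ((xs.length : Int) - 1 - k) = pvAt xs.reverse k := by
  rw [pvAt_nonneg xs _ (by omega), pvAt_nonneg xs.reverse k h0]
  have hk : k.toNat < xs.length := by omega
  have hrk : k.toNat < xs.reverse.length := by simpa using hk
  have hidx : ((xs.length : Int) - 1 - k).toNat = xs.length - 1 - k.toNat := by omega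
  rw [hidx, List.getElem?_eq_getElem hrk, List.getElem_reverse,
      List.getElem?_eq_getElem (show xs.length - 1 - k.toNat < xs.length by omega)]

-- the descending fold over xs equals the ascending fold over xs.reverse
lemma bob_rev (cap : Int) (xs : List Int) : ∀ (k : Nat) (a : Int) (s : Int × Int),
    0 ≤ a → a + k ≤ xs.length →
    (PySem.List.pyRange ((xs.length : Int) - 1 - a) ((xs.length : Int) - 1 - a - k) (-1)).foldl
        (altStep cap xs) s =
      (PySem.List.pyRange a (a + k) 1).foldl (altStep cap xs.reverse) s := by
  intro k
  induction k with
  | zero =>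
      intro a s h0 h1
      rw [show ((xs.length : Int) - 1 - a - ((0 : Nat) : Int)) = (xs.length : Int) - 1 - a by
            push_cast; ring,
          show a + ((0 : Nat) : Int) = a by push_cast; ring,
          PySem.List.pyRange_neg_one_eq_nil (le_refl _),
          PySem.List.pyRange_one_eq_nil (le_refl a)]
      simp
  | succ k ih =>
      intro a s h0 h1
      have h1' : a + 1 + (k : Int) ≤ xs.length := by push_cast at h1 ⊢; omega
      rw [PySem.List.pyRange_neg_one_cons
            (show (xs.length : Int) - 1 - a - ((k + 1 : Nat) : Int) < (xs.length : Int) - 1 - a by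
              push_cast; omega),
          PySem.List.pyRange_one_cons (show a < a + ((k + 1 : Nat) : Int) by push_cast; omega)]
      simp only [List.foldl_cons]
      have hstep : altStep cap xs s ((xs.length : Int) - 1 - a) = altStep cap xs.reverse s a := by
        unfold altStep
        rw [rev_at xs a h0 (by push_cast at h1 ⊢; omega)]
      rw [hstep,
          show (xs.length : Int) - 1 - a - 1 = (xs.length : Int) - 1 - (a + 1) by ring,
          show (xs.length : Int) - 1 - a - ((k + 1 : Nat) : Int) =
            (xs.length : Int) - 1 - (a + 1) - ((k : Nat) : Int) by push_cast; ring,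
          show a + ((k + 1 : Nat) : Int) = (a + 1) + ((k : Nat) : Int) by push_cast; ring]
      exact ih (a + 1) _ (by omega) h1'

-- ===== VERDICT (by name: the statement is the Claim_ definition above) =====
theorem minimumRefill_spec : Claim_equal_minimumRefill := by
  intro plants cA cB _
  unfold Spec_minimumRefill minimumRefill minimumRefill_alt
  by_cases h1 : (plants.length : Int) = 1
  · simp [h1]
  · simp only [h1, if_false]
    set n : Int := (plants.length : Int) with hn
    have hn0 : 0 ≤ n := by positivity
    have hhalf : PySem.Int.floordiv n 2 = n / 2 :=
      PySem.Int.floordiv_eq_ediv_of_pos (by norm_num)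
    set h : Int := PySem.Int.floordiv n 2 with hh
    have hh0 : 0 ≤ h := by rw [hhalf]; omega
    have hhn : h ≤ n := by rw [hhalf]; omega
    -- A's loop = altFin of the two direct folds
    have hA := loop_eq plants cA cB (h - 0).toNat 0 cA cB 0 0 rfl (le_refl 0)
      (by rw [← hh]; exact hh0)
    rw [show (0 : Int) + 0 = 0 by ring] at hA
    simp only [Int.sub_zero, ← hh, ← hn] at hA
    rw [hA]
    -- rewrite h as a Nat cast for the range lemmas
    have hcast : h = ((h.toNat : Nat) : Int) := by omega
    -- Bob's descending fold over plants = ascending fold over the reversal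
    have hrevlen : ((plants.reverse.length : Nat) : Int) = n := by simp [hn]
    have hB := bob_rev cB plants h.toNat 0 (cB, 0) (le_refl 0) (by omega)
    rw [show (0 : Int) + ((h.toNat : Nat) : Int) = h by omega, ← hcast] at hB
    simp only [← hn] at hB
    rw [show n - 1 - 0 = n - 1 by ring] at hB
    rw [hB]
    -- both sides via the bisimulation
    have hsA := side_eq cA plants h.toNat 0 0 0 (le_refl 0) (by omega)
    rw [show (0 : Int) + ((h.toNat : Nat) : Int) = h by omega, pref_zero,
        show cA - (0 - 0) = cA by ring] at hsA
    have hsB := side_eq cB plants.reverse h.toNat 0 0 0 (le_refl 0) (by omega)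
    rw [show (0 : Int) + ((h.toNat : Nat) : Int) = h by omega, pref_zero,
        show cB - (0 - 0) = cB by ring] at hsB
    rw [hsA, hsB]
    -- fold B's second scan counter offset
    set gA := (PySem.List.pyRange 0 h 1).foldl (prefStep cA (buildPrefix plants)) (0, 0) with hgA
    set gB := (PySem.List.pyRange 0 h 1).foldl (prefStep cB (buildPrefix plants.reverse)) (0, 0)
      with hgB
    have hoff := prefStep_offset cB (buildPrefix plants.reverse)
      (PySem.List.pyRange 0 h 1) (gA.1, 0)
    simp only [← hgB] at hoff
    rw [hoff]
    unfold altFin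
    split_ifs <;> ring
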